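-- pv_equiv track=rewrite | github.com/divyendrajadoun/Video_Scribe | app.py | transcript_to_markdown
-- ===== SOURCE A (Python) =====
-- def transcript_to_markdown(transcript):
--     md_text = ""
--     line_counter = 1
--     for entry in transcript:
--         md_text += f"{entry['text']} "
--         if line_counter % 3 == 0:
--             md_text += "  \n\n"
--         line_counter += 1
--     return md_text
-- ===== SOURCE B (Python) =====
-- def transcript_to_markdown(transcript):
--     it = iter(transcript)
--     blocks = []
--     done = False
--     while not done:
--         chunk = []
--         while len(chunk) < 3:
--             try:
--                 chunk.append(next(it)["text"])
--             except StopIteration: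
--                 done = True
--                 break
--         if not chunk:
--             break
--         block = "".join(t + " " for t in chunk)
--         if len(chunk) == 3:
--             block += "  \n\n"
--         blocks.append(block)
--     return "".join(blocks)
-- ===== Notes on version B (the rewrite author's own statement) =====
-- stated objective: alternative
-- what changed: B batches the transcript into blocks of three entries and joins per-block strings, instead of A's single accumulating loop with a 1-based counter tested modulo 3.
import Mathlib
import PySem

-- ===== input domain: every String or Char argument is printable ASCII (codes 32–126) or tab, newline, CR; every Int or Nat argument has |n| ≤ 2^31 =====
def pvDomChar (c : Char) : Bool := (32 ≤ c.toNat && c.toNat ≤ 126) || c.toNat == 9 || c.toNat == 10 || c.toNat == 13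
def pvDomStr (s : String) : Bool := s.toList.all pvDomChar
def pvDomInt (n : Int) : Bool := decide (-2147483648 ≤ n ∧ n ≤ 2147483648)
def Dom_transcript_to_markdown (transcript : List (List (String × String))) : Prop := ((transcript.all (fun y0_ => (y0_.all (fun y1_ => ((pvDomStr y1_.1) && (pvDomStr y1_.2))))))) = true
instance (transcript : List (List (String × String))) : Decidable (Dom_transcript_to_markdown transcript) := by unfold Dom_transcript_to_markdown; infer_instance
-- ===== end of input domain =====

-- B batches the transcript into blocks of three entries and joins the per-block strings,
-- replacing A's single accumulating loop with a counter (objective: alternative decomposition; same cost).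
-- Ports work over List Char (String.ofList at the end) so string concatenation is kernel-transparent.

-- ===== PORT A =====
-- entry['text'] (KeyError when missing → Pre_); `st.2 % 3` is Python-exact here since the divisor 3 is positive.
def transcript_to_markdown (transcript : List (List (String × String))) : String :=
  String.ofList ((transcript.foldl (fun (st : List Char × Int) e =>
      let md := st.1 ++ (((PySem.Dict.mk e).get? "text").getD "").toList ++ [' ']
      (if st.2 % 3 == 0 then md ++ [' ', ' ', '\n', '\n'] else md, st.2 + 1))
    ([], (1 : Int))).1)

-- ===== PORT B =====
-- the text of one entry, followed by the space A appends (Source B: t + " ")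
def pvTextSp (e : List (String × String)) : List Char :=
  (((PySem.Dict.mk e).get? "text").getD "").toList ++ [' ']

-- pull up to three entries at a time (Source B's inner next()-loop building `chunk`)
def pvChunks3 {α : Type} : List α → List (List α)
  | [] => []
  | [a] => [[a]]
  | [a, b] => [[a, b]]
  | a :: b :: c :: rest => [a, b, c] :: pvChunks3 rest

-- one block string (Source B: "".join(t + " " for t in chunk) plus the separator for a full chunk)
def pvBlock (c : List (List (String × String))) : List Char :=
  (c.map pvTextSp).flatten ++ (if c.length == 3 then [' ', ' ', '\n', '\n'] else [])

def transcript_to_markdown_alt (transcript : List (List (String × String))) : String :=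
  String.ofList (((pvChunks3 transcript).map pvBlock).flatten)

-- ===== PRECONDITION & SPEC =====
-- Pre_ excludes exactly the inputs where some entry lacks the key "text": there Python A raises KeyError.
def Pre_transcript_to_markdown (transcript : List (List (String × String))) : Prop :=
  ∀ e ∈ transcript, ((PySem.Dict.mk e).get? "text").isSome = true
instance (transcript : List (List (String × String))) : Decidable (Pre_transcript_to_markdown transcript) := by unfold Pre_transcript_to_markdown; infer_instance

def pvWitness_transcript_to_markdown : (List (List (String × String))) :=
  [[("text", "hello")], [("text", "world")], [("text", "again")], [("text", "more")]]

def Spec_transcript_to_markdown (transcript : List (List (String × String))) (out : String) : Prop := out = transcript_to_markdown_alt transcript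
instance (transcript : List (List (String × String))) (out : String) : Decidable (Spec_transcript_to_markdown transcript out) := by unfold Spec_transcript_to_markdown; infer_instance

-- ===== CLAIM (what is proved, stated in full; the proofs are below) =====
def Claim_equal_transcript_to_markdown : Prop := ∀ (transcript : List (List (String × String))), Dom_transcript_to_markdown transcript → Pre_transcript_to_markdown transcript → Spec_transcript_to_markdown transcript (transcript_to_markdown transcript)

-- ===== LEMMAS AND PROOFS =====

-- A's loop body, named for the proofs
def pvStepA (st : List Char × Int) (e : List (String × String)) : List Char × Int :=
  let md := st.1 ++ (((PySem.Dict.mk e).get? "text").getD "").toList ++ [' ']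
  (if st.2 % 3 == 0 then md ++ [' ', ' ', '\n', '\n'] else md, st.2 + 1)

lemma foldA_eq (ts : List (List (String × String))) :
    transcript_to_markdown ts = String.ofList ((ts.foldl pvStepA ([], 1)).1) := rfl

-- Loop invariant: starting from any accumulator and any counter ≡ 1 (mod 3),
-- A's fold appends exactly B's block decomposition of the remaining entries.
lemma loop_eq : ∀ (n : Nat) (ts : List (List (String × String))), ts.length ≤ n →
    ∀ (acc : List Char) (k : Int), k % 3 = 1 →
    (ts.foldl pvStepA (acc, k)).1 = acc ++ ((pvChunks3 ts).map pvBlock).flatten := by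
  intro n
  induction n with
  | zero =>
    intro ts h acc k hk
    have : ts = [] := List.eq_nil_of_length_eq_zero (Nat.le_zero.mp h)
    subst this; simp [pvChunks3]
  | succ n ih =>
    intro ts h acc k hk
    match ts with
    | [] => simp [pvChunks3]
    | [a] =>
      have h1 : (k % 3 == 0) = false := by simp; omega
      simp [pvStepA, pvChunks3, pvBlock, pvTextSp, h1]
    | [a, b] =>
      have h1 : (k % 3 == 0) = false := by simp; omega
      have h2 : ((k + 1) % 3 == 0) = false := by simp; omega
      simp [pvStepA, pvChunks3, pvBlock, pvTextSp, h1, h2]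
    | a :: b :: c :: rest =>
      have h1 : (k % 3 == 0) = false := by simp; omega
      have h2 : ((k + 1) % 3 == 0) = false := by simp; omega
      have h3 : ((k + 1 + 1) % 3 == 0) = true := by simp; omega
      have hk' : (k + 1 + 1 + 1) % 3 = 1 := by omega
      have hlen : rest.length ≤ n := by simp at h; omega
      show (List.foldl pvStepA (pvStepA (pvStepA (pvStepA (acc, k) a) b) c) rest).1 = _
      rw [show pvStepA (pvStepA (pvStepA (acc, k) a) b) c =
        (acc ++ pvTextSp a ++ pvTextSp b ++ pvTextSp c ++ [' ', ' ', '\n', '\n'], k + 1 + 1 + 1) by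
          simp [pvStepA, pvTextSp, h1, h2, h3]]
      rw [ih rest hlen _ _ hk']
      simp [pvChunks3, pvBlock, pvTextSp]

-- ===== VERDICT (by name: the statement is the Claim_ definition above) =====
theorem transcript_to_markdown_spec : Claim_equal_transcript_to_markdown := by
  intro ts _ _
  show transcript_to_markdown ts = transcript_to_markdown_alt ts
  rw [foldA_eq, loop_eq ts.length ts le_rfl [] 1 (by decide)]
  rfl
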